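-- pv_equiv track=rewrite | github.com/MaheshMadushan/Sudoku | sudoku.py | subgrid
-- ===== SOURCE A (Python) =====
-- puzzle=[[ 3, 8, 9, 0, 0, 0, 7, 0, 1 ],
-- 	[ 0, 0, 0, 6, 0, 9, 0, 0, 0 ],
-- 	[ 0, 0, 6, 7, 1, 0, 2, 0, 9 ],
-- 	[ 0, 2, 0, 8, 0, 0, 0, 0, 4 ],
-- 	[ 7, 0, 0, 2, 6, 5, 0, 0, 8 ],
-- 	[ 8, 0, 0, 0, 0, 3, 0, 2, 0 ],
-- 	[ 2, 0, 1, 0, 8, 4, 9, 0, 0 ],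
-- 	[ 0, 0, 0, 3, 0, 7, 0, 0, 0 ],
-- 	[ 9, 0, 7, 0, 0, 0, 4, 8, 3 ]]
--
-- def subgrid(row,column):
--     itemsInSubGrid = []
--     if row < 3:
--         if column < 3:
--             for i in range(3):
--                 for j in range(3):
--                     itemsInSubGrid.append(puzzle[i][j])
--         elif column < 6:
--             for i in range(3):
--                 for j in range(3,6):
--                     itemsInSubGrid.append(puzzle[i][j])
--         else:
--             for i in range(3):
--                 for j in range(6,9):
--                     itemsInSubGrid.append(puzzle[i][j])
--     elif row < 6:
--         if column < 3:
--             for i in range(3,6):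
--                 for j in range(3):
--                     itemsInSubGrid.append(puzzle[i][j])
--         elif column < 6:
--             for i in range(3,6):
--                 for j in range(3,6):
--                     itemsInSubGrid.append(puzzle[i][j])
--         else:
--             for i in range(3,6):
--                 for j in range(6,9):
--                     itemsInSubGrid.append(puzzle[i][j])
--     else:
--         if column < 3:
--             for i in range(6,9):
--                 for j in range(3):
--                     itemsInSubGrid.append(puzzle[i][j])
--         elif column < 6:
--             for i in range(6,9):
--                 for j in range(3,6):
--                     itemsInSubGrid.append(puzzle[i][j])
--         else:
--             for i in range(6,9):
--                 for j in range(6,9):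
--                     itemsInSubGrid.append(puzzle[i][j])
--     return itemsInSubGrid
-- ===== SOURCE B (Python) =====
-- puzzle=[[ 3, 8, 9, 0, 0, 0, 7, 0, 1 ],
-- 	[ 0, 0, 0, 6, 0, 9, 0, 0, 0 ],
-- 	[ 0, 0, 6, 7, 1, 0, 2, 0, 9 ],
-- 	[ 0, 2, 0, 8, 0, 0, 0, 0, 4 ],
-- 	[ 7, 0, 0, 2, 6, 5, 0, 0, 8 ],
-- 	[ 8, 0, 0, 0, 0, 3, 0, 2, 0 ],
-- 	[ 2, 0, 1, 0, 8, 4, 9, 0, 0 ],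
-- 	[ 0, 0, 0, 3, 0, 7, 0, 0, 0 ],
-- 	[ 9, 0, 7, 0, 0, 0, 4, 8, 3 ]]
--
-- def _block_table():
--     # one pass over all 81 cells, grouping each cell into its 3x3 block
--     d = {}
--     for i in range(9):
--         for j in range(9):
--             k = (i // 3, j // 3)
--             d[k] = d.get(k, []) + [puzzle[i][j]]
--     return d
--
-- _BLOCKS = _block_table()
--
-- def subgrid(row, column):
--     br = 0 if row < 3 else 1 if row < 6 else 2
--     bc = 0 if column < 3 else 1 if column < 6 else 2
--     return list(_BLOCKS[(br, bc)])
-- ===== Notes on version B (the rewrite author's own statement) =====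
-- stated objective: alternative
-- what changed: B precomputes a block-index table once (a single pass over all 81 cells grouped by (i//3, j//3) into a dict) and each call is just a clamped block lookup, instead of A's per-call 9-way if/elif cascade each running its own double loop.
import Mathlib
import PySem

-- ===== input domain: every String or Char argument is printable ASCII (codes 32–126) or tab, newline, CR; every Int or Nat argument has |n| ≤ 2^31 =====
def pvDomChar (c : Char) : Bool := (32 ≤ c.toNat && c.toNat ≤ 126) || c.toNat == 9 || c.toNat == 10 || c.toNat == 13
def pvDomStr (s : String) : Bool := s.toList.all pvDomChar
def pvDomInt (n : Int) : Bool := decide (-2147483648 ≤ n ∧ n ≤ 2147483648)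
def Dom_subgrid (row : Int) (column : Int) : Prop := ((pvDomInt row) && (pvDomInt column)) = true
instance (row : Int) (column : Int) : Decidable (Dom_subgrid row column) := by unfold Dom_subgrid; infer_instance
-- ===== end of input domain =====

set_option maxRecDepth 4000


-- Header: B precomputes a dict grouping all 81 cells by their 3x3 block in one pass;
-- each call is a clamped block-index lookup instead of A's 9-way cascade of double loops. Objective: alternative.

-- ===== PORT A =====
-- the module-level constant puzzle
def pvPuzzle : List (List Int) :=
  [[ 3, 8, 9, 0, 0, 0, 7, 0, 1 ],
   [ 0, 0, 0, 6, 0, 9, 0, 0, 0 ],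
   [ 0, 0, 6, 7, 1, 0, 2, 0, 9 ],
   [ 0, 2, 0, 8, 0, 0, 0, 0, 4 ],
   [ 7, 0, 0, 2, 6, 5, 0, 0, 8 ],
   [ 8, 0, 0, 0, 0, 3, 0, 2, 0 ],
   [ 2, 0, 1, 0, 8, 4, 9, 0, 0 ],
   [ 0, 0, 0, 3, 0, 7, 0, 0, 0 ],
   [ 9, 0, 7, 0, 0, 0, 4, 8, 3 ]]

-- puzzle[i][j]; every access in both ports uses i,j ∈ {0..8}, so pyGet? is always `some`
-- and the .getD defaults are never taken (exact on all admitted inputs)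
def pvAt (i j : Int) : Int := (PySem.List.pyGet? ((PySem.List.pyGet? pvPuzzle i).getD []) j).getD 0

def subgrid (row : Int) (column : Int) : List Int :=
  if row < 3 then
    if column < 3 then
      (PySem.List.pyRange 0 3 1).foldl (fun acc i =>
        (PySem.List.pyRange 0 3 1).foldl (fun acc j => acc ++ [pvAt i j]) acc) []
    else if column < 6 then
      (PySem.List.pyRange 0 3 1).foldl (fun acc i =>
        (PySem.List.pyRange 3 6 1).foldl (fun acc j => acc ++ [pvAt i j]) acc) []
    else
      (PySem.List.pyRange 0 3 1).foldl (fun acc i =>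
        (PySem.List.pyRange 6 9 1).foldl (fun acc j => acc ++ [pvAt i j]) acc) []
  else if row < 6 then
    if column < 3 then
      (PySem.List.pyRange 3 6 1).foldl (fun acc i =>
        (PySem.List.pyRange 0 3 1).foldl (fun acc j => acc ++ [pvAt i j]) acc) []
    else if column < 6 then
      (PySem.List.pyRange 3 6 1).foldl (fun acc i =>
        (PySem.List.pyRange 3 6 1).foldl (fun acc j => acc ++ [pvAt i j]) acc) []
    else
      (PySem.List.pyRange 3 6 1).foldl (fun acc i =>
        (PySem.List.pyRange 6 9 1).foldl (fun acc j => acc ++ [pvAt i j]) acc) []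
  else
    if column < 3 then
      (PySem.List.pyRange 6 9 1).foldl (fun acc i =>
        (PySem.List.pyRange 0 3 1).foldl (fun acc j => acc ++ [pvAt i j]) acc) []
    else if column < 6 then
      (PySem.List.pyRange 6 9 1).foldl (fun acc i =>
        (PySem.List.pyRange 3 6 1).foldl (fun acc j => acc ++ [pvAt i j]) acc) []
    else
      (PySem.List.pyRange 6 9 1).foldl (fun acc i =>
        (PySem.List.pyRange 6 9 1).foldl (fun acc j => acc ++ [pvAt i j]) acc) []

-- ===== PORT B =====
-- _BLOCKS = _block_table(): one pass over all 81 cells, d[(i//3, j//3)] = d.get(k, []) + [puzzle[i][j]]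
def pvBlocks : PySem.Dict (Int × Int) (List Int) :=
  (PySem.List.pyRange 0 9 1).foldl (fun d i =>
    (PySem.List.pyRange 0 9 1).foldl (fun d j =>
      let k := (PySem.Int.floordiv i 3, PySem.Int.floordiv j 3)
      d.insert k ((d.getD k []) ++ [pvAt i j])) d) PySem.Dict.empty

def subgrid_alt (row : Int) (column : Int) : List Int :=
  let br : Int := if row < 3 then 0 else if row < 6 then 1 else 2
  let bc : Int := if column < 3 then 0 else if column < 6 then 1 else 2
  -- the key (br, bc) is always present in pvBlocks, so the .getD default is never taken
  pvBlocks.getD (br, bc) []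

-- ===== PRECONDITION & SPEC =====
def Spec_subgrid (row : Int) (column : Int) (out : List Int) : Prop := out = subgrid_alt row column
instance (row : Int) (column : Int) (out : List Int) : Decidable (Spec_subgrid row column out) := by unfold Spec_subgrid; infer_instance

-- ===== CLAIM (what is proved, stated in full; the proofs are below) =====
def Claim_equal_subgrid : Prop := ∀ (row : Int) (column : Int), Dom_subgrid row column → Spec_subgrid row column (subgrid row column)

-- ===== LEMMAS AND PROOFS =====

-- ===== VERDICT (by name: the statement is the Claim_ definition above) =====
theorem subgrid_spec : Claim_equal_subgrid := by
  intro row column _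
  unfold Spec_subgrid subgrid subgrid_alt
  split_ifs <;> decide
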